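-- pv_equiv track=rewrite | github.com/JulianaBallin/recommendation-systems-sefaz | recomendSystemColabExample1.py | recommend
-- ===== SOURCE A (Python) =====
-- def manhattan(rating1, rating2):
--     distance = 0
--     commonRatings = False  # Flag para saber se os dois usuários têm músicas em comum
--
--     for key in rating1:
--         if key in rating2:
--             distance += abs(rating1[key] - rating2[key])  # Soma a diferença absoluta das notas
--             commonRatings = True
--
--     if commonRatings:
--         return distance  # Retorna a distância total
--     else:
--         return -1  # Retorna -1 se não houver músicas em comum
--
-- def computeNearestNeighbor(username, users):
--     distances = []  # Lista de tuplas (distância, nome_do_usuário)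
--
--     for user in users:
--         if user != username:
--             distance = manhattan(users[user], users[username])  # Calcula a distância
--             distances.append((distance, user))
--
--     distances.sort()  # Ordena pela menor distância (mais semelhante primeiro)
--     return distances
--
-- def recommend(username, users):
--     # Chama a função anterior para encontrar o usuário mais próximo e pega apenas o nome desse usuário.
--     nearest = computeNearestNeighbor(username, users)[0][1]  # Nome do usuário mais próximo
--     recommendations = []  # Lista de recomendações
--
--     # Armazena as avaliações do vizinho mais próximo e do usuário atual em variáveis separadas
--     neighborRatings = users[nearest]  # Avaliações do vizinho
--     userRatings = users[username]  # Avaliações do usuário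
--
--     # Para cada item avaliado pelo vizinho, verifica se o usuário ainda não avaliou.
--     # Se for o caso, adiciona esse item à lista de recomendações.
--     for artist in neighborRatings:
--         if artist not in userRatings:
--             recommendations.append((artist, neighborRatings[artist]))  # Adiciona recomendação
--
--     # Ordena por maior pontuação do vizinho
--     return sorted(recommendations, key=lambda artistTuple: artistTuple[1], reverse=True)
-- ===== SOURCE B (Python) =====
-- def recommend(username, users):
--     # single linear pass tracking the running (distance, user) minimum instead of
--     # building and sorting the whole distances list
--     userRatings = users[username]
--     best = None
--     for user in users:
--         if user != username:
--             ratings = users[user]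
--             common = [k for k in ratings if k in userRatings]
--             dist = sum(abs(ratings[k] - userRatings[k]) for k in common) if common else -1
--             cand = (dist, user)
--             if best is None or cand < best:
--                 best = cand
--     neighborRatings = users[best[1]]
--     recs = [(a, neighborRatings[a]) for a in neighborRatings if a not in userRatings]
--     return sorted(recs, key=lambda t: t[1], reverse=True)
-- ===== Notes on version B (the rewrite author's own statement) =====
-- stated objective: simpler
-- what changed: Replaces A's build-the-whole-distances-list-then-sort nearest-neighbour step with a single linear pass tracking a running (distance, user) minimum with Python's tuple ordering, and computes the manhattan distance as a filter-then-sum over the common keys instead of a flag-and-accumulator loop.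
import Mathlib
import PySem

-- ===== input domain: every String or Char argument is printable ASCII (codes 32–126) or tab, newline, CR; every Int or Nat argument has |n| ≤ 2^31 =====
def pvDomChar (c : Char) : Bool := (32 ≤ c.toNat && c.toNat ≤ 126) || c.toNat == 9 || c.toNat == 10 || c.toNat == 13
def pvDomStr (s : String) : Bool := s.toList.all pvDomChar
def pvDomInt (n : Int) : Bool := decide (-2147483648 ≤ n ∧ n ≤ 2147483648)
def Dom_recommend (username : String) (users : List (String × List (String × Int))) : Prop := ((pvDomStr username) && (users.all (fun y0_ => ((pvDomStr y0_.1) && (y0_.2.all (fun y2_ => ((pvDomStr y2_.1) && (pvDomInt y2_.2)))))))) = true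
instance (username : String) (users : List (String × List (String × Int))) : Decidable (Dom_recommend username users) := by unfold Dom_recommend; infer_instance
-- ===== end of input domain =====

-- B replaces A's build-all-distances-then-sort nearest-neighbour step by a single running-minimum pass (objective: simpler).

-- ===== PORT A =====
-- dict lookup (first match, per the association-list convention)
def manhattan (rating1 rating2 : List (String × Int)) : Int :=
  -- distance accumulator and commonRatings flag, threaded through the loop
  let st := rating1.foldl (fun (st : Int × Bool) p =>
    if (rating2.lookup p.1).isSome then
      (st.1 + |(rating1.lookup p.1).getD 0 - (rating2.lookup p.1).getD 0|, true)
    else st) (0, false)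
  if st.2 then st.1 else -1

def computeNearestNeighbor (username : String) (users : List (String × List (String × Int))) : List (Int × String) :=
  let distances := users.foldl (fun acc p =>
    if p.1 ≠ username then
      acc ++ [(manhattan ((users.lookup p.1).getD []) ((users.lookup username).getD []), p.1)]
    else acc) []
  PySem.List.sorted2 distances (fun t => t.1) (fun t => t.2)

def recommend (username : String) (users : List (String × List (String × Int))) : List (String × Int) :=
  let nearest := (PySem.List.pyGetD (computeNearestNeighbor username users) 0 (0, "")).2
  let neighborRatings := (users.lookup nearest).getD []
  let userRatings := (users.lookup username).getD []
  let recommendations := neighborRatings.foldl (fun acc p =>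
    if (userRatings.lookup p.1).isNone then
      acc ++ [(p.1, (neighborRatings.lookup p.1).getD 0)]
    else acc) []
  PySem.List.sorted recommendations (fun t => t.2) true

-- ===== PORT B =====
def recommend_alt (username : String) (users : List (String × List (String × Int))) : List (String × Int) :=
  let userRatings := (users.lookup username).getD []
  let best := users.foldl (fun (best : Option (Int × String)) p =>
    if p.1 ≠ username then
      let ratings := (users.lookup p.1).getD []
      let common := ratings.filter (fun q => (userRatings.lookup q.1).isSome)
      let dist : Int := if common.isEmpty then -1
        else (common.map (fun q => |(ratings.lookup q.1).getD 0 - (userRatings.lookup q.1).getD 0|)).sum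
      let cand := (dist, p.1)
      match best with
      | none => some cand
      | some b => if cand.1 < b.1 ∨ (¬ b.1 < cand.1 ∧ cand.2 < b.2) then some cand else some b
    else best) none
  let neighborRatings := (users.lookup (best.getD (0, "")).2).getD []
  let recs := (neighborRatings.filter (fun q => (userRatings.lookup q.1).isNone)).map
    (fun q => (q.1, (neighborRatings.lookup q.1).getD 0))
  PySem.List.sorted recs (fun t => t.2) true

-- ===== PRECONDITION & SPEC =====
-- Pre_ excludes exactly the inputs where A raises: username missing from users (KeyError)
-- or no user other than username (IndexError on the empty distances list).
def Pre_recommend (username : String) (users : List (String × List (String × Int))) : Prop :=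
  (∃ p ∈ users, p.1 = username) ∧ (∃ p ∈ users, p.1 ≠ username)
instance (username : String) (users : List (String × List (String × Int))) : Decidable (Pre_recommend username users) := by unfold Pre_recommend; infer_instance

def pvWitness_recommend : String × (List (String × List (String × Int))) :=
  ("a", [("a", [("x", 1)]), ("b", [("x", 3), ("y", 5)])])

def Spec_recommend (username : String) (users : List (String × List (String × Int))) (out : List (String × Int)) : Prop := out = recommend_alt username users
instance (username : String) (users : List (String × List (String × Int))) (out : List (String × Int)) : Decidable (Spec_recommend username users out) := by unfold Spec_recommend; infer_instance

-- ===== CLAIM (what is proved, stated in full; the proofs are below) =====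
def Claim_equal_recommend : Prop := ∀ (username : String) (users : List (String × List (String × Int))), Dom_recommend username users → Pre_recommend username users → Spec_recommend username users (recommend username users)

-- ===== LEMMAS AND PROOFS =====
theorem head?_insertBy {α : Type} (before : α → α → Bool) (x : α) (l : List α) :
    (PySem.List.insertBy before x l).head? =
      some (match l with | [] => x | y :: _ => if before x y then x else y) := by
  cases l with
  | nil => simp [PySem.List.insertBy]
  | cons y ys =>
    by_cases h : before x y
    · simp [PySem.List.insertBy, h]
    · simp [PySem.List.insertBy, h]

theorem head?_foldl_insertBy {α : Type} (before : α → α → Bool)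
    (g : Option α → α → Option α)
    (hgn : ∀ x, g none x = some x)
    (hgs : ∀ m x, g (some m) x = if before x m then some x else some m)
    (xs : List α) (acc : List α) :
    (xs.foldl (fun a x => PySem.List.insertBy before x a) acc).head? =
      xs.foldl g acc.head? := by
  induction xs generalizing acc with
  | nil => rfl
  | cons x xs ih =>
    simp only [List.foldl_cons]
    rw [ih, head?_insertBy]
    cases acc with
    | nil => rw [List.head?_nil, hgn]
    | cons y ys => simp only [List.head?_cons, hgs, apply_ite some]

theorem foldl_isSome {α β : Type} (g : Option β → α → Option β)
    (hg : ∀ o x, o.isSome → (g o x).isSome) (l : List α) (o : Option β)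
    (ho : o.isSome) : (l.foldl g o).isSome := by
  induction l generalizing o with
  | nil => exact ho
  | cons x xs ih => exact ih (g o x) (hg o x ho)

theorem manhattan_eq (r1 r2 : List (String × Int)) :
    manhattan r1 r2 =
      (let common := r1.filter (fun q => (r2.lookup q.1).isSome)
       if common.isEmpty then (-1 : Int)
       else (common.map (fun q => |(r1.lookup q.1).getD 0 - (r2.lookup q.1).getD 0|)).sum) := by
  unfold manhattan
  have hstep : (fun (st : Int × Bool) (p : String × Int) =>
      if (r2.lookup p.1).isSome then
        (st.1 + |(r1.lookup p.1).getD 0 - (r2.lookup p.1).getD 0|, true)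
      else st)
      = fun (st : Int × Bool) (p : String × Int) =>
        ((if (r2.lookup p.1).isSome then st.1 + |(r1.lookup p.1).getD 0 - (r2.lookup p.1).getD 0| else st.1),
         (if (r2.lookup p.1).isSome then true else st.2)) := by
    funext st p; split_ifs <;> rfl
  rw [hstep]
  rw [PySem.List.foldl_prod_mk
    (f := fun (s : Int) (p : String × Int) => if (r2.lookup p.1).isSome then s + |(r1.lookup p.1).getD 0 - (r2.lookup p.1).getD 0| else s)
    (g := fun (s : Bool) (p : String × Int) => if (r2.lookup p.1).isSome then true else s)]
  rw [PySem.List.foldl_if_eq_foldl_filter, PySem.List.foldl_add, PySem.List.foldl_if_true_eq]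
  simp only [Bool.false_or, zero_add]
  by_cases h : r1.any (fun p => (r2.lookup p.1).isSome)
  · have hne : ¬ (r1.filter (fun q => (r2.lookup q.1).isSome)).isEmpty := by
      simp only [List.isEmpty_iff, List.filter_eq_nil_iff]
      simp only [List.any_eq_true] at h
      obtain ⟨x, hx, hx2⟩ := h
      intro hc; exact absurd hx2 (by simpa using hc x hx)
    simp [h, hne]
  · have he : (r1.filter (fun q => (r2.lookup q.1).isSome)).isEmpty := by
      simp only [List.isEmpty_iff, List.filter_eq_nil_iff]
      simp only [List.any_eq_true, not_exists] at h
      intro a ha; simpa using fun hc => (h a) ⟨ha, hc⟩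
    simp [h, he]

-- ===== VERDICT (by name: the statement is the Claim_ definition above) =====
theorem recommend_spec : Claim_equal_recommend := by
  intro username users _dom hpre
  obtain ⟨hin, hother⟩ := hpre
  unfold Spec_recommend recommend recommend_alt computeNearestNeighbor
  simp only []
  set ur := (users.lookup username).getD [] with hur
  set fA := fun (p : String × List (String × Int)) =>
    ((manhattan ((users.lookup p.1).getD []) ur), p.1) with hfA
  set bef := fun (a b : Int × String) =>
    (decide (a.1 < b.1) || (!decide (b.1 < a.1) && decide (a.2 < b.2))) with hbef
  set gmin := fun (o : Option (Int × String)) (x : Int × String) =>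
    match o with
    | none => some x
    | some m => if bef x m then some x else some m with hgmin
  set D := (users.filter (fun p => decide (p.1 ≠ username))).map fA with hD
  -- A's distances list
  have hA : users.foldl (fun acc p => if p.1 ≠ username then acc ++ [fA p] else acc) [] = D := by
    rw [PySem.List.foldl_append_ite]; simp [hD]
  rw [hA]
  -- B's running-minimum fold is the same fold taken over D
  have hB : users.foldl (fun (best : Option (Int × String)) p =>
      if p.1 ≠ username then
        let ratings := (users.lookup p.1).getD []
        let common := ratings.filter (fun q => (ur.lookup q.1).isSome)
        let dist : Int := if common.isEmpty then -1
          else (common.map (fun q => |(ratings.lookup q.1).getD 0 - (ur.lookup q.1).getD 0|)).sum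
        let cand := (dist, p.1)
        match best with
        | none => some cand
        | some b => if cand.1 < b.1 ∨ (¬ b.1 < cand.1 ∧ cand.2 < b.2) then some cand else some b
      else best) none = D.foldl gmin none := by
    have hstep : (fun (best : Option (Int × String)) (p : String × List (String × Int)) =>
        if p.1 ≠ username then
          let ratings := (users.lookup p.1).getD []
          let common := ratings.filter (fun q => (ur.lookup q.1).isSome)
          let dist : Int := if common.isEmpty then -1
            else (common.map (fun q => |(ratings.lookup q.1).getD 0 - (ur.lookup q.1).getD 0|)).sum
          let cand := (dist, p.1)
          match best with
          | none => some cand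
          | some b => if cand.1 < b.1 ∨ (¬ b.1 < cand.1 ∧ cand.2 < b.2) then some cand else some b
        else best)
        = fun best p => if p.1 ≠ username then gmin best (fA p) else best := by
      funext best p
      by_cases hp : p.1 ≠ username
      · simp only [hgmin, hfA, manhattan_eq]
        cases best with
        | none => rfl
        | some b =>
          simp only [hbef, Bool.or_eq_true, Bool.and_eq_true, Bool.not_eq_true',
            decide_eq_true_eq, decide_eq_false_iff_not]
      · simp [hp]
    rw [hstep, PySem.List.foldl_ite_eq_foldl_filter]
    rw [hD, List.foldl_map]
  rw [hB]
  -- D is nonempty, so the fold yields some minimum m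
  have hDne : D ≠ [] := by
    obtain ⟨p, hpmem, hpne⟩ := hother
    simp only [hD, ne_eq, List.map_eq_nil_iff, List.filter_eq_nil_iff]
    intro hc; exact absurd (by simpa using hc p hpmem) (by simpa using hpne)
  obtain ⟨m, hm⟩ : ∃ m, D.foldl gmin none = some m := by
    apply Option.isSome_iff_exists.mp
    cases hE : D with
    | nil => exact absurd hE hDne
    | cons x xs =>
      simp only [List.foldl_cons]
      refine foldl_isSome gmin ?_ xs (gmin none x) ?_
      · intro o x ho
        cases o with
        | none => simp [hgmin]
        | some b => simp only [hgmin]; split <;> simp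
      · simp [hgmin]
  -- head of the stable sort equals the running minimum
  have hhead : (PySem.List.sorted2 D (fun t => t.1) (fun t => t.2)).head? = some m := by
    rw [show PySem.List.sorted2 D (fun (t : Int × String) => t.1) (fun t => t.2)
        = D.foldl (fun a x => PySem.List.insertBy bef x a) [] from rfl]
    rw [head?_foldl_insertBy bef gmin (by intro x; simp [hgmin])
      (by intro m x; simp [hgmin])]
    simpa using hm
  have hget : PySem.List.pyGetD (PySem.List.sorted2 D (fun t => t.1) (fun t => t.2)) 0 ((0:Int), "") = m := by
    rw [PySem.List.pyGetD_zero, List.getD_eq_getElem?_getD, ← List.head?_eq_getElem?, hhead]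
    rfl
  rw [hget, hm]
  -- the recommendations loop is the filter-map
  rw [PySem.List.foldl_append_if]
  simp
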